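-- pv_equiv track=rewrite | github.com/patruk91/battleship | ship.py | handle_ship_indexes
-- ===== SOURCE A (Python) =====
-- def ship_size():
--     size = {
--         "Carrier": 5,
--         # "Battleship": 4,
--         # "Cruiser": 3,
--         # "Submarine": 3,
--         "Destroyer": 2,
--     }
--     return size
--
-- def handle_ship_indexes(grid_for_ship):
--     size = list(ship_size().values())
--     ship_indexes = []
--
--     for index1, value1 in enumerate(grid_for_ship):
--         for index2, value2 in enumerate(value1):
--             if value2 == 'S':
--                 res = (index1, index2)
--                 ship_indexes.append(res)
--
--     ship_indexes = [ship_indexes[sum(size[:i]):sum(size[:i+1])] for i in range(len(size))]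
--     return ship_indexes
-- ===== SOURCE B (Python) =====
-- def ship_size():
--     size = {
--         "Carrier": 5,
--         "Destroyer": 2,
--     }
--     return size
--
-- def handle_ship_indexes(grid_for_ship):
--     # Single fused pass: fill one group per ship size while scanning, no
--     # collect-then-slice second phase.
--     sizes = list(ship_size().values())
--     groups = [[] for _ in sizes]
--     g = 0
--     cnt = 0
--     for i, row in enumerate(grid_for_ship):
--         for j, v in enumerate(row):
--             if v == 'S':
--                 if g == len(sizes):
--                     continue
--                 groups[g].append((i, j))
--                 cnt += 1
--                 if cnt == sizes[g]:
--                     g += 1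
--                     cnt = 0
--     return groups
-- ===== Notes on version B (the rewrite author's own statement) =====
-- stated objective: alternative
-- what changed: Replaces collect-all-then-slice-by-cumulative-sums with a single fused pass that appends each 'S' coordinate directly into the current size group, advancing groups as each fills and ignoring cells once all groups are full.
import Mathlib
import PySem

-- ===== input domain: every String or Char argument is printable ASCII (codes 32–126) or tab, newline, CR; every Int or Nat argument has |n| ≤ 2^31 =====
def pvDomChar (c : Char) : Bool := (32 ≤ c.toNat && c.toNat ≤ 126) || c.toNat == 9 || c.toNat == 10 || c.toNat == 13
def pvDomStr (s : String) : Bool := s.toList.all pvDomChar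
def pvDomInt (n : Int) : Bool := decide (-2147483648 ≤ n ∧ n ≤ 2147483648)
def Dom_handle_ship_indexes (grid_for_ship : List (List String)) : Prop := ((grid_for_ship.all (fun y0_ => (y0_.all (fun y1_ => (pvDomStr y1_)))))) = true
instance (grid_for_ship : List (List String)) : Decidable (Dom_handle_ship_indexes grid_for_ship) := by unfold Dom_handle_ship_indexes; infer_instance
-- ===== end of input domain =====

-- B replaces A's collect-then-slice with one fused pass filling the size groups directly (alternative decomposition, same cost).

-- ===== PORT A =====
def ship_size : PySem.Dict String Int :=
  PySem.Dict.ofList [("Carrier", 5), ("Destroyer", 2)]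

-- local 'ship_indexes' before the re-slicing (A's collection loop)
def shipIndexesA (grid_for_ship : List (List String)) : List (Int × Int) :=
  (PySem.List.enumerate grid_for_ship 0).foldl (fun acc p =>
    (PySem.List.enumerate p.2 0).foldl (fun acc q =>
      if q.2 = "S" then acc ++ [(p.1, q.1)] else acc) acc) []

def handle_ship_indexes (grid_for_ship : List (List String)) : List (List (Int × Int)) :=
  (PySem.List.pyRange 0 (ship_size.values.length : Int) 1).map (fun i =>
    PySem.List.slice (shipIndexesA grid_for_ship)
      (some ((PySem.List.slice ship_size.values none (some i)).sum))
      (some ((PySem.List.slice ship_size.values none (some (i + 1))).sum)))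

-- ===== PORT B =====
def ship_size_alt : PySem.Dict String Int :=
  PySem.Dict.ofList [("Carrier", 5), ("Destroyer", 2)]

def bStep (sizes : List Int) (s : List (List (Int × Int)) × Nat × Int) (x : Int × Int) :
    List (List (Int × Int)) × Nat × Int :=
  if s.2.1 = sizes.length then s
  else
    let groups' := s.1.set s.2.1 (s.1.getD s.2.1 [] ++ [x])
    let cnt' := s.2.2 + 1
    if cnt' = sizes.getD s.2.1 0 then (groups', s.2.1 + 1, 0) else (groups', s.2.1, cnt')

def handle_ship_indexes_alt (grid_for_ship : List (List String)) : List (List (Int × Int)) :=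
  ((PySem.List.enumerate grid_for_ship 0).foldl (fun s p =>
      (PySem.List.enumerate p.2 0).foldl (fun s q =>
        if q.2 = "S" then bStep ship_size_alt.values s (p.1, q.1) else s) s)
      (ship_size_alt.values.map (fun _ => []), 0, 0)).1

-- ===== PRECONDITION & SPEC =====
def Spec_handle_ship_indexes (grid_for_ship : List (List String)) (out : List (List (Int × Int))) : Prop := out = handle_ship_indexes_alt grid_for_ship
instance (grid_for_ship : List (List String)) (out : List (List (Int × Int))) : Decidable (Spec_handle_ship_indexes grid_for_ship out) := by unfold Spec_handle_ship_indexes; infer_instance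

-- ===== CLAIM (what is proved, stated in full; the proofs are below) =====
def Claim_equal_handle_ship_indexes : Prop := ∀ (grid_for_ship : List (List String)), Dom_handle_ship_indexes grid_for_ship → Spec_handle_ship_indexes grid_for_ship (handle_ship_indexes grid_for_ship)

-- ===== LEMMAS AND PROOFS =====

-- fold with a guarded step over l = plain fold over the filtered+mapped list
theorem foldl_if_filter_map {α β γ : Type} (p : α → Prop) [DecidablePred p]
    (h : α → β) (f : γ → β → γ) (l : List α) (s : γ) :
    l.foldl (fun s x => if p x then f s (h x) else s) s
      = ((l.filter (fun x => decide (p x))).map h).foldl f s := by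
  induction l generalizing s with
  | nil => rfl
  | cons a t ih =>
    by_cases hp : p a <;> simp [hp, ih]

-- the list of 'S' coordinates collected in row-major order
def coordsOf (grid : List (List String)) : List (Int × Int) :=
  (PySem.List.enumerate grid 0).flatMap (fun p =>
    ((PySem.List.enumerate p.2 0).filter (fun q => decide (q.2 = "S"))).map
      (fun q => (p.1, q.1)))

theorem nested_collect (l : List (Int × List String)) (acc : List (Int × Int)) :
    l.foldl (fun acc p => (PySem.List.enumerate p.2 0).foldl
        (fun acc q => if q.2 = "S" then acc ++ [(p.1, q.1)] else acc) acc) acc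
      = acc ++ l.flatMap (fun p =>
          ((PySem.List.enumerate p.2 0).filter (fun q => decide (q.2 = "S"))).map
            (fun q => ((p.1, q.1) : Int × Int))) := by
  induction l generalizing acc with
  | nil => simp
  | cons a t ih =>
    rw [List.foldl_cons, PySem.List.foldl_append_ite, ih, List.flatMap_cons, List.append_assoc]

theorem collectA_eq (grid : List (List String)) : shipIndexesA grid = coordsOf grid := by
  unfold shipIndexesA coordsOf
  rw [nested_collect, List.nil_append]

theorem A_eq_slices (grid : List (List String)) :
    handle_ship_indexes grid
      = [(coordsOf grid).take 5, ((coordsOf grid).drop 5).take 2] := by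
  unfold handle_ship_indexes
  rw [collectA_eq]
  have hsz : ship_size.values = [(5 : Int), 2] := by decide
  rw [hsz]
  have hr : PySem.List.pyRange 0 (([(5 : Int), 2].length : Int)) 1 = [0, 1] := by decide
  rw [hr]
  simp only [List.map_cons, List.map_nil]
  congr 1
  · rw [show ((PySem.List.slice [(5:Int),2] none (some 0)).sum) = (0:Int) by decide,
        show ((PySem.List.slice [(5:Int),2] none (some (0+1))).sum) = (5:Int) by decide]
    rw [PySem.List.slice_toNat _ (by norm_num) (by norm_num)]
    rfl
  · congr 1
    rw [show ((PySem.List.slice [(5:Int),2] none (some 1)).sum) = (5:Int) by decide,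
        show ((PySem.List.slice [(5:Int),2] none (some (1+1))).sum) = (7:Int) by decide]
    rw [PySem.List.slice_toNat _ (by norm_num) (by norm_num)]
    rfl

-- closed form of B's fold state after consuming cs
def gOf (n : Nat) : Nat := if n < 5 then 0 else if n < 7 then 1 else 2
def cOf (n : Nat) : Int := if n < 5 then (n : Int) else if n < 7 then (n : Int) - 5 else 0

theorem bfold_invariant (cs : List (Int × Int)) :
    cs.foldl (bStep [5, 2]) ([[], []], 0, (0 : Int))
      = ([cs.take 5, (cs.drop 5).take 2], gOf cs.length, cOf cs.length) := by
  induction cs using List.reverseRecOn with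
  | nil => simp [gOf, cOf]
  | append_singleton cs x ih =>
    rw [List.foldl_append, ih, List.foldl_cons, List.foldl_nil]
    by_cases h5 : cs.length < 5
    · have ht : cs.take 5 = cs := List.take_of_length_le (by omega)
      have hd : (cs.drop 5).take 2 = [] := by rw [List.drop_of_length_le (by omega)]; rfl
      have hT : (cs ++ [x]).take 5 = cs ++ [x] := List.take_of_length_le (by simp; omega)
      have hD : ((cs ++ [x]).drop 5).take 2 = [] := by
        rw [List.drop_of_length_le (by simp; omega)]; rfl
      by_cases hfull : cs.length + 1 = 5
      · simp [bStep, gOf, cOf, ht, hd, hT, hD, h5,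
              show ((cs.length : Int) + 1 = 5) from by omega,
              show ¬ (cs.length + 1 < 5) from by omega,
              show cs.length + 1 < 7 from by omega]
      · simp [bStep, gOf, cOf, ht, hd, hT, hD, h5,
              show ¬ ((cs.length : Int) + 1 = 5) from by omega,
              show cs.length + 1 < 5 from by omega]
    · by_cases h7 : cs.length < 7
      · have htd : (cs.drop 5).take 2 = cs.drop 5 := List.take_of_length_le (by simp; omega)
        have hta : (cs ++ [x]).take 5 = cs.take 5 := List.take_append_of_le_length (by omega)
        have hda : (cs ++ [x]).drop 5 = cs.drop 5 ++ [x] :=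
          List.drop_append_of_le_length (by omega)
        have htd' : (cs.drop 5 ++ [x]).take 2 = cs.drop 5 ++ [x] :=
          List.take_of_length_le (by simp; omega)
        by_cases hfull : cs.length + 1 = 7
        · simp [bStep, gOf, cOf, htd, hta, hda, htd', h5, h7,
                show ((cs.length : Int) - 5 + 1 = 2) from by omega,
                show ¬ (cs.length + 1 < 5) from by omega,
                show ¬ (cs.length + 1 < 7) from by omega]
        · simp [bStep, gOf, cOf, htd, hta, hda, htd', h5, h7,
                show ¬ ((cs.length : Int) - 5 + 1 = 2) from by omega,
                show ¬ (cs.length + 1 < 5) from by omega,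
                show cs.length + 1 < 7 from by omega]
          omega
      · have hta : (cs ++ [x]).take 5 = cs.take 5 := List.take_append_of_le_length (by omega)
        have hda : (cs ++ [x]).drop 5 = cs.drop 5 ++ [x] :=
          List.drop_append_of_le_length (by omega)
        have htd : (cs.drop 5 ++ [x]).take 2 = (cs.drop 5).take 2 :=
          List.take_append_of_le_length (by simp; omega)
        simp [bStep, gOf, cOf, hta, hda, htd, h5, h7,
              show ¬ (cs.length + 1 < 5) from by omega,
              show ¬ (cs.length + 1 < 7) from by omega]

theorem nested_bfold (l : List (Int × List String)) (s : List (List (Int × Int)) × Nat × Int) :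
    l.foldl (fun s p => (PySem.List.enumerate p.2 0).foldl
        (fun s q => if q.2 = "S" then bStep [5, 2] s (p.1, q.1) else s) s) s
      = (l.flatMap (fun p =>
          ((PySem.List.enumerate p.2 0).filter (fun q => decide (q.2 = "S"))).map
            (fun q => ((p.1, q.1) : Int × Int)))).foldl (bStep [5, 2]) s := by
  induction l generalizing s with
  | nil => simp
  | cons a t ih =>
    rw [List.foldl_cons, foldl_if_filter_map (fun (q : Int × String) => q.2 = "S")
          (fun (q : Int × String) => ((a.1, q.1) : Int × Int)) (bStep [5, 2]), ih,
        List.flatMap_cons, List.foldl_append]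

theorem B_eq_slices (grid : List (List String)) :
    handle_ship_indexes_alt grid
      = [(coordsOf grid).take 5, ((coordsOf grid).drop 5).take 2] := by
  unfold handle_ship_indexes_alt
  have hsz : ship_size_alt.values = [(5 : Int), 2] := by decide
  rw [hsz]
  rw [show ([(5:Int), 2].map (fun _ => ([] : List (Int × Int))), (0:Nat), (0:Int))
        = (([[], []] : List (List (Int × Int))), (0:Nat), (0:Int)) from rfl]
  rw [nested_bfold, show (List.flatMap _ (PySem.List.enumerate grid 0)) = coordsOf grid from rfl]
  rw [bfold_invariant]

-- ===== VERDICT (by name: the statement is the Claim_ definition above) =====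
theorem handle_ship_indexes_spec : Claim_equal_handle_ship_indexes := by
  intro grid _
  unfold Spec_handle_ship_indexes
  rw [A_eq_slices, B_eq_slices]
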